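-- pv_equiv track=rewrite | github.com/luisa-li/misc | equivariance/order_2.py | equality_pattern
-- ===== SOURCE A (Python) =====
-- def equality_pattern(index_tuple):
--     """Return the equality pattern label of a tuple as integers."""
--     label_map = {}
--     next_label = 0
--     pattern = []
--     for val in index_tuple:
--         if val not in label_map:
--             label_map[val] = next_label
--             next_label += 1
--         pattern.append(label_map[val])
--     return tuple(pattern)
-- ===== SOURCE B (Python) =====
-- def equality_pattern(index_tuple):
--     """Return the equality pattern label of a tuple as integers."""
--     xs = list(index_tuple)
--     return tuple(len(set(xs[:xs.index(v)])) for v in xs)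
-- ===== Notes on version B (the rewrite author's own statement) =====
-- stated objective: alternative
-- what changed: Drops A's incrementally built label dict entirely: each element's label is computed independently as the number of distinct values strictly before its first occurrence (len(set(xs[:xs.index(v)]))), nested scans instead of a one-pass dict build.
import Mathlib
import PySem

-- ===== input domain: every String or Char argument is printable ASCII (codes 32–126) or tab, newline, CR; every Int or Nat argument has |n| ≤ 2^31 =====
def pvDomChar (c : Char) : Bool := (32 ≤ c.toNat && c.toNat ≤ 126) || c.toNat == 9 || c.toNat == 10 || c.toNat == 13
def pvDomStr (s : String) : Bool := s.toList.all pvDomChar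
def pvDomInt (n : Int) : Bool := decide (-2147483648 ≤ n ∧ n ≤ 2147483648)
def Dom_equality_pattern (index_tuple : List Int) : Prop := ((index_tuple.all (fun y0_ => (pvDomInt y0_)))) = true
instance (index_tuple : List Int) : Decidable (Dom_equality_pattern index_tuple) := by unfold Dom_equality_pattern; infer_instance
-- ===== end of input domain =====

-- B drops A's incrementally built label dict: each element is labelled independently as the
-- number of distinct values strictly before its first occurrence (nested scans); alternative, not faster.


-- ===== PORT A =====
-- A's loop: label_map / next_label / pattern carried as one foldl state.
def equality_pattern_step (st : PySem.Dict Int Int × Int × List Int) (val : Int) :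
    PySem.Dict Int Int × Int × List Int :=
  let lm := if st.1.contains val then st.1 else st.1.insert val st.2.1
  let nl := if st.1.contains val then st.2.1 else st.2.1 + 1
  (lm, nl, st.2.2 ++ [lm.getD val 0])

def equality_pattern (index_tuple : List Int) : List Int :=
  (index_tuple.foldl equality_pattern_step (PySem.Dict.empty, 0, [])).2.2

-- ===== PORT B =====
-- B: tuple(len(set(xs[:xs.index(v)])) for v in xs) — no dict, each label computed independently.
-- xs.index(v) is PySem.List.index?; v always occurs in xs here, so the .getD 0 branch is unreachable.
def equality_pattern_alt (index_tuple : List Int) : List Int :=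
  index_tuple.map (fun v =>
    ((PySem.List.dedup
        (PySem.List.slice index_tuple none
          (some (((PySem.List.index? index_tuple v).getD 0 : Nat) : Int)))).length : Int))

-- ===== PRECONDITION & SPEC =====
def Spec_equality_pattern (index_tuple : List Int) (out : List Int) : Prop := out = equality_pattern_alt index_tuple
instance (index_tuple : List Int) (out : List Int) : Decidable (Spec_equality_pattern index_tuple out) := by unfold Spec_equality_pattern; infer_instance

-- ===== CLAIM =====
def Claim_equal_equality_pattern : Prop := ∀ (index_tuple : List Int), Dom_equality_pattern index_tuple → Spec_equality_pattern index_tuple (equality_pattern index_tuple)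

-- ===== LEMMAS AND PROOFS =====

-- the canonical label: index of v's first occurrence among the distinct values of xs
def pvLbl (xs : List Int) (v : Int) : Int := ((PySem.List.dedup xs).idxOf v : Int)

theorem pvDedup_append_singleton (pre : List Int) (v : Int) :
    PySem.List.dedup (pre ++ [v]) =
      if v ∈ PySem.List.dedup pre then PySem.List.dedup pre else PySem.List.dedup pre ++ [v] := by
  simp [PySem.List.dedup, PySem.Set.ofList, List.foldl_append, PySem.Set.add]

theorem pvMem_dedup (xs : List Int) (v : Int) : v ∈ PySem.List.dedup xs ↔ v ∈ xs :=
  PySem.List.mem_dedup xs v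

-- dedup (pre ++ l) extends dedup pre
theorem pvDedup_prefix (pre l : List Int) :
    ∃ t, PySem.List.dedup (pre ++ l) = PySem.List.dedup pre ++ t := by
  induction l using List.reverseRecOn with
  | nil => exact ⟨[], by simp⟩
  | append_singleton l x ih =>
    obtain ⟨t, ht⟩ := ih
    rw [← List.append_assoc, pvDedup_append_singleton, ht]
    by_cases h : x ∈ PySem.List.dedup pre ++ t
    · exact ⟨t, by rw [if_pos h]⟩
    · exact ⟨t ++ [x], by rw [if_neg h, List.append_assoc]⟩

-- labels already assigned are stable under extending the list
theorem pvLbl_stable (pre l : List Int) (v : Int) (hv : v ∈ pre) :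
    pvLbl (pre ++ l) v = pvLbl pre v := by
  obtain ⟨t, ht⟩ := pvDedup_prefix pre l
  have hm : v ∈ PySem.List.dedup pre := (pvMem_dedup pre v).mpr hv
  unfold pvLbl
  rw [ht, List.idxOf_append, if_pos hm]

-- the freshly assigned label is the current count of distinct values
theorem pvLbl_fresh (pre : List Int) (v : Int) (hv : v ∉ pre) :
    pvLbl (pre ++ [v]) v = ((PySem.List.dedup pre).length : Int) := by
  have hm : v ∉ PySem.List.dedup pre := fun h => hv ((pvMem_dedup pre v).mp h)
  unfold pvLbl
  rw [pvDedup_append_singleton, if_neg hm, List.idxOf_append, if_neg hm]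
  simp [List.idxOf_cons_self]

-- B computes the canonical labels: for v ∈ xs, the number of distinct values before v's
-- first occurrence is v's index in dedup xs.
theorem pvB_eq_map (xs : List Int) :
    equality_pattern_alt xs = xs.map (pvLbl xs) := by
  unfold equality_pattern_alt
  apply List.map_congr_left
  intro v hv
  obtain ⟨k, hk⟩ := (PySem.List.index?_isSome_iff xs v).mpr hv |> Option.isSome_iff_exists.mp
  obtain ⟨pre, suf, hxs, hlen, hvpre⟩ := (PySem.List.index?_eq_some_iff xs v k).mp hk
  rw [hk]
  simp only [Option.getD_some]
  rw [PySem.List.slice_to_natCast]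
  have htake : xs.take k = pre := by
    rw [hxs, ← hlen, List.take_left]
  rw [htake]
  have h1 : pvLbl xs v = ((PySem.List.dedup pre).length : Int) := by
    have : xs = (pre ++ [v]) ++ suf := by simp [hxs]
    rw [this, pvLbl_stable (pre ++ [v]) suf v (by simp), pvLbl_fresh pre v hvpre]
  rw [h1]

-- A's loop invariant: the dict holds the canonical labels of the prefix processed so far
theorem pvA_loop (rest : List Int) (pre : List Int) (d : PySem.Dict Int Int) (p : List Int)
    (hd : ∀ v, d.get? v = if v ∈ pre then some (pvLbl pre v) else none) :
    (rest.foldl equality_pattern_step (d, ((PySem.List.dedup pre).length : Int), p)).2.2 =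
      p ++ rest.map (pvLbl (pre ++ rest)) := by
  induction rest generalizing pre d p with
  | nil => simp
  | cons v rest ih =>
    simp only [List.foldl_cons, List.map_cons]
    have hcont : d.contains v = (decide (v ∈ pre)) := by
      rw [PySem.Dict.contains_eq_isSome_get?, hd v]
      by_cases h : v ∈ pre <;> simp [h]
    by_cases hv : v ∈ pre
    · -- seen before: dict and counter unchanged
      have hc : d.contains v = true := by rw [hcont]; exact decide_eq_true hv
      have hgd : d.getD v 0 = pvLbl pre v := by
        rw [PySem.Dict.getD_eq_get?_getD, hd v, if_pos hv]; rfl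
      have hstep : equality_pattern_step (d, ((PySem.List.dedup pre).length : Int), p) v =
          (d, ((PySem.List.dedup pre).length : Int), p ++ [pvLbl pre v]) := by
        simp [equality_pattern_step, hc, hgd]
      rw [hstep]
      have hded : PySem.List.dedup (pre ++ [v]) = PySem.List.dedup pre := by
        rw [pvDedup_append_singleton, if_pos ((pvMem_dedup pre v).mpr hv)]
      have := ih (pre ++ [v]) d (p ++ [pvLbl pre v]) (by
        intro w
        rw [hd w]
        by_cases hw : w ∈ pre
        · have : w ∈ pre ++ [v] := by simp [hw]
          simp only [hw, if_true, this, if_true]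
          rw [pvLbl_stable pre [v] w hw]
        · have : ¬ w ∈ pre ++ [v] := by
            simp only [List.mem_append, List.mem_singleton, not_or]
            exact ⟨hw, fun h => hw (h ▸ hv)⟩
          simp [hw, this])
      rw [hded] at this
      rw [this, List.append_assoc, List.singleton_append]
      congr 2
      · rw [← pvLbl_stable pre (v :: rest) v hv]
      · apply List.map_congr_left; intro w _
        rw [List.append_assoc, List.singleton_append]
    · -- fresh value: insert with the next label
      have hc : d.contains v = false := by rw [hcont]; exact decide_eq_false hv
      have hstep : equality_pattern_step (d, ((PySem.List.dedup pre).length : Int), p) v =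
          (d.insert v ((PySem.List.dedup pre).length : Int),
           ((PySem.List.dedup pre).length : Int) + 1,
           p ++ [((PySem.List.dedup pre).length : Int)]) := by
        simp [equality_pattern_step, hc]
      rw [hstep]
      have hded : PySem.List.dedup (pre ++ [v]) = PySem.List.dedup pre ++ [v] := by
        rw [pvDedup_append_singleton, if_neg (fun h => hv ((pvMem_dedup pre v).mp h))]
      have hlen : (((PySem.List.dedup pre).length : Int) + 1) =
          ((PySem.List.dedup (pre ++ [v])).length : Int) := by
        rw [hded, List.length_append, List.length_cons, List.length_nil]
        push_cast
        ring
      rw [hlen]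
      have := ih (pre ++ [v]) (d.insert v ((PySem.List.dedup pre).length : Int))
        (p ++ [((PySem.List.dedup pre).length : Int)]) (by
        intro w
        by_cases hw : w = v
        · subst hw
          rw [PySem.Dict.get?_insert_self]
          have hmem : w ∈ pre ++ [w] := by simp
          simp only [hmem, if_true]
          rw [pvLbl_fresh pre w hv]
        · rw [PySem.Dict.get?_insert_of_ne _ _ hw, hd w]
          by_cases hwp : w ∈ pre
          · have : w ∈ pre ++ [v] := by simp [hwp]
            simp only [hwp, if_true, this, if_true]
            rw [pvLbl_stable pre [v] w hwp]
          · have : ¬ w ∈ pre ++ [v] := by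
              simp only [List.mem_append, List.mem_singleton, not_or]
              exact ⟨hwp, hw⟩
            simp [hwp, this])
      rw [this, List.append_assoc, List.singleton_append]
      congr 2
      · rw [← List.singleton_append, ← List.append_assoc]
        rw [pvLbl_stable (pre ++ [v]) rest v (by simp), pvLbl_fresh pre v hv]
      · apply List.map_congr_left; intro w _
        rw [List.append_assoc, List.singleton_append]

-- ===== VERDICT =====
theorem equality_pattern_spec : Claim_equal_equality_pattern := by
  intro xs _
  show equality_pattern xs = equality_pattern_alt xs
  rw [pvB_eq_map]
  unfold equality_pattern
  have := pvA_loop xs [] PySem.Dict.empty [] (by intro v; simp [PySem.Dict.get?_empty])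
  simp [PySem.List.dedup, PySem.Set.ofList, PySem.Set.empty] at this
  simpa using this
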